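-- pv_equiv track=rewrite | github.com/tunauygun/Elevator-Simulator | timing_diagram.py | count_running_time
-- ===== SOURCE A (Python) =====
-- def count_running_time(task_states: list[tuple[int, int]], running_value: int):
--     """ Returns a list of number of occurences of running states for a taks and
--         when did it start running
--
--         >>> count_running_time([0, 2, 2, 2, 0, 2, 2, 2, 2, 2, 1, 2, 2], 2)
--             [(1, 3), (5, 5), (11, 2)]
--
--         >>> count_running_time([1, 1, 2, 2, 2, 2, 1, 1, 2, 2, 2, 2, 2], 2)
--             [(2, 4), (8, 5)]
--
--     """
--     clusters = []
--     count = 0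
--     cluster_start = None
--
--     for idx, num in enumerate(task_states):
--         if num == running_value:
--             count += 1
--             if cluster_start is None:
--                 cluster_start = idx
--         elif count > 0:
--             clusters.append((cluster_start, count))
--             count = 0
--             cluster_start = None
--
--     if count > 0:
--         clusters.append((cluster_start, count))
--
--     return clusters
-- ===== SOURCE B (Python) =====
-- def count_running_time(task_states, running_value):
--     # Pass 1: segment the whole list into maximal runs of equal values as (value, length).
--     runs = []
--     i = 0
--     n = len(task_states)
--     while i < n:
--         j = i + 1
--         while j < n and task_states[j] == task_states[i]:
--             j += 1
--         runs.append((task_states[i], j - i))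
--         i = j
--     # Pass 2: walk the runs with a running start index, keeping the matching ones.
--     clusters = []
--     idx = 0
--     for value, length in runs:
--         if value == running_value:
--             clusters.append((idx, length))
--         idx += length
--     return clusters
-- ===== Notes on version B (the rewrite author's own statement) =====
-- stated objective: alternative
-- what changed: Replaces A's single-pass count/cluster_start state machine (with a trailing flush) by a two-pass decomposition: first segment the list into maximal runs of equal values as (value, length), then scan the runs with a running start index keeping those whose value equals running_value.
import Mathlib
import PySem

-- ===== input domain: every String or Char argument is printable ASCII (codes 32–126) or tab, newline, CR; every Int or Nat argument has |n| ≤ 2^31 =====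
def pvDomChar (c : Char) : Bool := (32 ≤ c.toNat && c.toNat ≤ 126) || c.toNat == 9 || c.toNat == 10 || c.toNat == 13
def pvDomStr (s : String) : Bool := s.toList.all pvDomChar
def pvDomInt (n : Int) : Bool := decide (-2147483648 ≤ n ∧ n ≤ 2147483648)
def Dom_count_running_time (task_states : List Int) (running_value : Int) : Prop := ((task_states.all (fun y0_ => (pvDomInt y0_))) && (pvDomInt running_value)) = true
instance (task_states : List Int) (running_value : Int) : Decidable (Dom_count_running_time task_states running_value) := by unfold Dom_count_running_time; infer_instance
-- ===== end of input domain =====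

-- B replaces A's count/cluster_start state machine by a two-pass decomposition:
-- first segment the list into maximal runs (value, length), then filter the runs
-- of running_value while accumulating start indices (objective: alternative).


-- ===== PORT A =====
-- 'for idx, num in enumerate(task_states)' carrying (clusters, count, cluster_start)
def crtLoopA (rv : Int) : List Int → Nat → List (Int × Int) → Int → Option Int →
    List (Int × Int) × Int × Option Int
  | [], _, clusters, count, cs => (clusters, count, cs)
  | num :: rest, idx, clusters, count, cs =>
    if num = rv then
      crtLoopA rv rest (idx + 1) clusters (count + 1)
        (if cs.isNone then some (idx : Int) else cs)
    else if count > 0 then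
      crtLoopA rv rest (idx + 1) (clusters ++ [(cs.getD 0, count)]) 0 none
    else
      crtLoopA rv rest (idx + 1) clusters count cs

def count_running_time (task_states : List Int) (running_value : Int) : List (Int × Int) :=
  let st := crtLoopA running_value task_states 0 [] 0 none
  if st.2.1 > 0 then st.1 ++ [(st.2.2.getD 0, st.2.1)] else st.1

-- ===== PORT B =====
-- Pass 1: maximal runs of equal values as (value, length)
def crtRuns : List Int → List (Int × Int)
  | [] => []
  | x :: rest =>
    (x, ((rest.takeWhile (· = x)).length : Int) + 1) :: crtRuns (rest.dropWhile (· = x))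
  termination_by xs => xs.length
  decreasing_by simpa using Nat.lt_succ_of_le (List.length_dropWhile_le _ _)

-- Pass 2: running start index, keep matching runs
def crtLoopB (rv : Int) : List (Int × Int) → Int → List (Int × Int) → List (Int × Int)
  | [], _, clusters => clusters
  | (value, length) :: rest, idx, clusters =>
    crtLoopB rv rest (idx + length) (if value = rv then clusters ++ [(idx, length)] else clusters)

def count_running_time_alt (task_states : List Int) (running_value : Int) : List (Int × Int) :=
  crtLoopB running_value (crtRuns task_states) 0 []

-- ===== PRECONDITION & SPEC =====
def Spec_count_running_time (task_states : List Int) (running_value : Int) (out : List (Int × Int)) : Prop := out = count_running_time_alt task_states running_value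
instance (task_states : List Int) (running_value : Int) (out : List (Int × Int)) : Decidable (Spec_count_running_time task_states running_value out) := by unfold Spec_count_running_time; infer_instance

-- ===== CLAIM (what is proved, stated in full; the proofs are below) =====
def Claim_equal_count_running_time : Prop := ∀ (task_states : List Int) (running_value : Int), Dom_count_running_time task_states running_value → Spec_count_running_time task_states running_value (count_running_time task_states running_value)

-- ===== LEMMAS AND PROOFS =====

theorem crtRuns_nil : crtRuns [] = [] := by rw [crtRuns.eq_def]

theorem crtRuns_cons (x : Int) (rest : List Int) : crtRuns (x :: rest) =
    (x, ((rest.takeWhile (· = x)).length : Int) + 1) :: crtRuns (rest.dropWhile (· = x)) := by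
  rw [crtRuns.eq_def]

-- reference recursion: the clusters contributed by xs starting at index idx
def crtSpec (rv : Int) : List Int → Nat → List (Int × Int)
  | [], _ => []
  | x :: rest, idx =>
    if x = rv then
      ((idx : Int), ((rest.takeWhile (· = rv)).length : Int) + 1) ::
        crtSpec rv (rest.dropWhile (· = rv)) (idx + (rest.takeWhile (· = rv)).length + 1)
    else crtSpec rv rest (idx + 1)
  termination_by xs _ => xs.length
  decreasing_by
  · simpa using Nat.lt_succ_of_le (List.length_dropWhile_le _ _)
  · simp

theorem crtSpec_nil (rv : Int) (idx : Nat) : crtSpec rv [] idx = [] := by rw [crtSpec.eq_def]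

theorem crtSpec_cons (rv x : Int) (rest : List Int) (idx : Nat) : crtSpec rv (x :: rest) idx =
    (if x = rv then
      ((idx : Int), ((rest.takeWhile (· = rv)).length : Int) + 1) ::
        crtSpec rv (rest.dropWhile (· = rv)) (idx + (rest.takeWhile (· = rv)).length + 1)
    else crtSpec rv rest (idx + 1)) := by rw [crtSpec.eq_def]

def crtFinalize (st : List (Int × Int) × Int × Option Int) : List (Int × Int) :=
  if st.2.1 > 0 then st.1 ++ [(st.2.2.getD 0, st.2.1)] else st.1

-- joint strong induction: idle-state and in-run characterisations of A's loop
theorem crtLoopA_char (rv : Int) :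
    ∀ n (xs : List Int), xs.length = n →
      (∀ idx clusters,
        crtFinalize (crtLoopA rv xs idx clusters 0 none) = clusters ++ crtSpec rv xs idx) ∧
      (∀ idx clusters (k s : Int), 0 < k →
        crtFinalize (crtLoopA rv xs idx clusters k (some s)) =
          clusters ++ (s, k + ((xs.takeWhile (· = rv)).length : Int)) ::
            crtSpec rv (xs.dropWhile (· = rv)) (idx + (xs.takeWhile (· = rv)).length)) := by
  intro n
  induction n using Nat.strong_induction_on with
  | _ n ih =>
    intro xs hlen
    constructor
    · intro idx clusters
      match xs with
      | [] => simp [crtLoopA, crtSpec_nil, crtFinalize]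
      | x :: rest =>
        have hr : rest.length < n := by simp at hlen; omega
        by_cases hx : x = rv
        · subst hx
          rw [crtLoopA]
          norm_num
          have h2 := ((ih rest.length hr rest rfl).2) (idx + 1) clusters 1 (idx : Int)
            (by norm_num)
          rw [h2, crtSpec_cons, if_pos rfl]
          have e : idx + 1 + (rest.takeWhile (· = x)).length
              = idx + (rest.takeWhile (· = x)).length + 1 := by omega
          rw [e]
          norm_num [add_comm]
        · rw [crtLoopA, if_neg hx]
          norm_num
          have h1 := ((ih rest.length hr rest rfl).1) (idx + 1) clusters
          rw [h1, crtSpec_cons, if_neg hx]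
    · intro idx clusters k s hk
      match xs with
      | [] => simp [crtLoopA, crtFinalize, hk, crtSpec_nil]
      | x :: rest =>
        have hr : rest.length < n := by simp at hlen; omega
        by_cases hx : x = rv
        · subst hx
          rw [crtLoopA]
          norm_num
          have h2 := ((ih rest.length hr rest rfl).2) (idx + 1) clusters (k + 1) s
            (by omega)
          rw [h2]
          have e : idx + 1 + (rest.takeWhile (· = x)).length
              = idx + ((rest.takeWhile (· = x)).length + 1) := by omega
          have e2 : k + 1 + ((rest.takeWhile (· = x)).length : Int)
              = k + (((rest.takeWhile (· = x)).length : Int) + 1) := by ring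
          rw [e, e2]
        · rw [crtLoopA, if_neg hx, if_pos hk]
          have h1 := ((ih rest.length hr rest rfl).1) (idx + 1)
            (clusters ++ [((some s).getD 0, k)])
          rw [h1]
          have hd : (decide (x = rv)) = false := by simp [hx]
          simp only [List.takeWhile_cons, List.dropWhile_cons, hd, Bool.false_eq_true,
            if_false, Option.getD_some]
          rw [crtSpec_cons, if_neg hx]
          simp

-- B's loop equals the reference recursion
theorem crtLoopB_char (rv : Int) :
    ∀ n (xs : List Int), xs.length = n → ∀ (idx : Nat) clusters,
      crtLoopB rv (crtRuns xs) (idx : Int) clusters = clusters ++ crtSpec rv xs idx := by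
  intro n
  induction n using Nat.strong_induction_on with
  | _ n ih =>
    intro xs hlen idx clusters
    match xs with
    | [] => simp [crtRuns_nil, crtLoopB, crtSpec_nil]
    | x :: rest =>
      rw [crtRuns_cons, crtLoopB]
      have hr : (rest.dropWhile (· = x)).length < n := by
        simp at hlen
        exact lt_of_le_of_lt (List.length_dropWhile_le _ _) (by omega)
      have hidx : ((idx : Int) + (((rest.takeWhile (· = x)).length : Int) + 1)) =
          ((idx + (rest.takeWhile (· = x)).length + 1 : Nat) : Int) := by push_cast; ring
      by_cases hx : x = rv
      · subst hx
        rw [if_pos rfl, hidx, ih _ hr _ rfl, crtSpec_cons, if_pos rfl]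
        simp
      · rw [if_neg hx]
        -- skipping a non-matching run: crtSpec walks it element by element
        have skip : ∀ (ys : List Int), (∀ y ∈ ys, y = x) → ∀ (j : Nat),
            crtSpec rv (ys ++ rest.dropWhile (· = x)) j =
              crtSpec rv (rest.dropWhile (· = x)) (j + ys.length) := by
          intro ys hys
          induction ys with
          | nil => intro j; simp
          | cons y ys ihy =>
            intro j
            have hy : y = x := hys y (by simp)
            rw [List.cons_append, crtSpec_cons, if_neg (hy ▸ hx)]
            rw [ihy (fun z hz => hys z (by simp [hz])) (j + 1)]
            congr 1
            simp; omega
        have hsplit : x :: rest = (x :: rest.takeWhile (· = x)) ++ rest.dropWhile (· = x) := by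
          simp [List.takeWhile_append_dropWhile]
        have hall : ∀ y ∈ x :: rest.takeWhile (· = x), y = x := by
          intro y hy
          rcases List.mem_cons.mp hy with h | h
          · exact h
          · simpa using List.mem_takeWhile_imp h
        rw [hidx, ih _ hr _ rfl]
        conv_rhs => rw [hsplit]
        rw [skip _ hall idx]
        rw [List.length_cons, ← Nat.add_assoc]

-- ===== VERDICT (by name: the statement is the Claim_ definition above) =====
theorem count_running_time_spec : Claim_equal_count_running_time := by
  intro ts rv _
  unfold Spec_count_running_time count_running_time count_running_time_alt
  have hA := (crtLoopA_char rv ts.length ts rfl).1 0 []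
  have hB := crtLoopB_char rv ts.length ts rfl 0 []
  simp only [crtFinalize] at hA
  simp only [Nat.cast_zero] at hB
  rw [hB, ← hA]
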